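-- pv_equiv track=rewrite | github.com/morethanbooks/library_classification_rom | code/hierarchy.py | dfs
-- ===== SOURCE A (Python) =====
-- def dfs(graph, start='root'):
--     def _dfs(visited, graph, node, level):
--         if node not in visited:
--             yield node, level
--             visited.add(node)
--             for child in graph.get(node, []):
--                 yield from _dfs(visited, graph, child, level + 1)
--
--     visited = set()
--     yield from _dfs(visited, graph, start, 0)
-- ===== SOURCE B (Python) =====
-- def dfs(graph, start='root'):
--     visited = set()
--     stack = [(start, 0)]
--     while stack:
--         node, level = stack.pop()
--         if node not in visited:
--             yield node, level
--             visited.add(node)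
--             for child in reversed(list(graph.get(node, []))):
--                 stack.append((child, level + 1))
-- ===== Notes on version B (the rewrite author's own statement) =====
-- stated objective: alternative
-- what changed: Replaces A's recursive generator (nested _dfs with yield from) by an iterative explicit-stack DFS that pops (node, level) pairs and pushes reversed child lists, keeping the single shared visited set.
import Mathlib
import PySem

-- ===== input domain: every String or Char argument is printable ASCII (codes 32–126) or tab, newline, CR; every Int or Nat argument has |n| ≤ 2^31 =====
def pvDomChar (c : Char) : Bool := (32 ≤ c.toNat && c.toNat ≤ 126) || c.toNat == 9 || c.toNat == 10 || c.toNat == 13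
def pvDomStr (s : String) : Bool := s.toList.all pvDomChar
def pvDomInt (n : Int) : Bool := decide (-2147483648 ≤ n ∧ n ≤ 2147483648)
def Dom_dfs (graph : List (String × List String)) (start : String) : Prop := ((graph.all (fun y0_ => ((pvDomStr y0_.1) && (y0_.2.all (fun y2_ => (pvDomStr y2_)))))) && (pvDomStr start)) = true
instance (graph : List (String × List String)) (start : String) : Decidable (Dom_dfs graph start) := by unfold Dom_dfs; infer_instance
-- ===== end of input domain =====

-- B replaces A's recursive generator by an iterative explicit-stack DFS with the
-- same shared visited set (different decomposition; same output order and cost).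

-- graph.get(node, []) — shared by both ports
def childrenOf (graph : List (String × List String)) (node : String) : List String :=
  (PySem.Dict.mk graph).getD node []

-- ===== PORT A =====
-- A is a recursive generator; its port is the fueled recursion returning the list of
-- yields together with the (mutated) visited set.  The fuel only bounds recursion
-- depth (depth ≤ #distinct visited nodes + 1 ≤ fuel chosen in `dfs`): it is a
-- totality guard, never reached on a branch where A would still yield.
def goA (graph : List (String × List String)) :
    Nat → PySem.Set String → String → Int → List (String × Int) × PySem.Set String
  | 0, v, _, _ => ([], v)
  | f + 1, v, node, level =>
    if PySem.Set.contains v node then ([], v)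
    else
      (childrenOf graph node).foldl
        (fun p c => let r := goA graph f p.2 c (level + 1); (p.1 ++ r.1, r.2))
        ([(node, level)], PySem.Set.add v node)

def dfs (graph : List (String × List String)) (start : String) : List (String × Int) :=
  -- every node A ever visits lies in start :: (all children lists), so this fuel suffices
  (goA graph ((start :: graph.flatMap (fun p => p.2)).length + 1) PySem.Set.empty start 0).1

-- ===== PORT B =====
-- number of members of `all` not yet visited (termination measure of the loop)
def mCount (all : List String) (v : PySem.Set String) : Nat :=
  all.countP (fun x => !(PySem.Set.contains v x))

theorem contains_add_eq (v : PySem.Set String) (n x : String) :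
    PySem.Set.contains (PySem.Set.add v n) x = (PySem.Set.contains v x || x == n) := by
  simp only [PySem.Set.add]
  by_cases h : PySem.Set.contains v n = true <;>
    by_cases hx : x = n <;>
    simp_all [PySem.Set.contains]

theorem countP_lt_of (p q : String → Bool) (hpq : ∀ x, q x = true → p x = true)
    (n : String) (hq : q n = false) (hp : p n = true) :
    ∀ l : List String, n ∈ l → l.countP q < l.countP p := by
  intro l hl
  induction l with
  | nil => simp at hl
  | cons a t ih =>
    simp only [List.countP_cons]
    have hle : t.countP q ≤ t.countP p := List.countP_mono_left (fun x _ h => hpq x h)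
    rcases List.mem_cons.mp hl with h | h
    · subst h; simp [hq, hp]; omega
    · have := ih h
      by_cases hqa : q a = true
      · simp [hqa, hpq a hqa]; omega
      · simp only [Bool.not_eq_true] at hqa
        by_cases hpa : p a = true <;> simp [hqa, hpa] <;> omega

theorem mCount_add_lt (all : List String) (v : PySem.Set String) (n : String)
    (hmem : all.contains n = true) (hv : PySem.Set.contains v n = false) :
    mCount all (PySem.Set.add v n) < mCount all v :=
  countP_lt_of _ _
    (fun x hx => by
      simp only [Bool.not_eq_true', contains_add_eq, Bool.or_eq_false_iff] at hx
      simp only [Bool.not_eq_true', hx.1])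
    n (by simp only [contains_add_eq, beq_self_eq_true, Bool.or_true, Bool.not_true])
    (by simp only [hv, Bool.not_false]) all (by simpa using hmem)

def loopB (graph : List (String × List String)) (all : List String)
    (v : PySem.Set String) (stack : List (String × Int)) : List (String × Int) :=
  match stack with
  | [] => []
  | (node, level) :: rest =>
    if h : (PySem.Set.contains v node || !(all.contains node)) = true then
      loopB graph all v rest
    else
      -- push reversed(children) one by one onto the stack top  =  children ++ rest
      (node, level) :: loopB graph all (PySem.Set.add v node)
        ((childrenOf graph node).map (fun c => (c, level + 1)) ++ rest)
termination_by (mCount all v, stack.length)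
decreasing_by
  · exact Prod.Lex.right _ (by simp)
  · exact Prod.Lex.left _ _ (by
      simp only [Bool.or_eq_true, not_or, Bool.not_eq_true] at h
      exact mCount_add_lt all v node (by simpa using h.2) h.1)

def dfs_alt (graph : List (String × List String)) (start : String) : List (String × Int) :=
  -- the `all` argument is a pure termination guard: every stacked node is in it
  loopB graph (start :: graph.flatMap (fun p => p.2)) PySem.Set.empty [(start, 0)]

-- ===== PRECONDITION & SPEC =====
def Spec_dfs (graph : List (String × List String)) (start : String) (out : List (String × Int)) : Prop := out = dfs_alt graph start
instance (graph : List (String × List String)) (start : String) (out : List (String × Int)) : Decidable (Spec_dfs graph start out) := by unfold Spec_dfs; infer_instance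

-- ===== CLAIM (what is proved, stated in full; the proofs are below) =====
def Claim_equal_dfs : Prop := ∀ (graph : List (String × List String)) (start : String), Dom_dfs graph start → Spec_dfs graph start (dfs graph start)

-- ===== LEMMAS AND PROOFS =====

theorem contains_add_of_contains (v : PySem.Set String) (n x : String)
    (h : PySem.Set.contains v x = true) :
    PySem.Set.contains (PySem.Set.add v n) x = true := by
  rw [contains_add_eq, h]; rfl

theorem goA_grows (graph : List (String × List String)) :
    ∀ (f : Nat) (v : PySem.Set String) (n : String) (l : Int) (x : String),
      PySem.Set.contains v x = true →
      PySem.Set.contains (goA graph f v n l).2 x = true := by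
  intro f
  induction f with
  | zero => intro v n l x h; simpa [goA] using h
  | succ f ih =>
    intro v n l x h
    rw [goA]
    split
    · simpa using h
    · have key : ∀ (cs : List String) (p : List (String × Int) × PySem.Set String),
          PySem.Set.contains p.2 x = true →
          PySem.Set.contains
            (cs.foldl (fun p c => let r := goA graph f p.2 c (l + 1); (p.1 ++ r.1, r.2)) p).2
            x = true := by
        intro cs
        induction cs with
        | nil => intro p hp; simpa using hp
        | cons c t iht =>
          intro p hp
          exact iht _ (ih p.2 c (l + 1) x hp)
      exact key _ _ (contains_add_of_contains v n x h)

theorem mCount_mono (all : List String) (v w : PySem.Set String)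
    (h : ∀ x, PySem.Set.contains v x = true → PySem.Set.contains w x = true) :
    mCount all w ≤ mCount all v := by
  apply List.countP_mono_left
  intro a _ ha
  simp only [Bool.not_eq_true'] at ha ⊢
  cases hvc : PySem.Set.contains v a
  · rfl
  · exact absurd (show a ∈ w by simpa using h a hvc) (by simpa using ha)

theorem goA_fold_acc (graph : List (String × List String)) (f : Nat) (l : Int) :
    ∀ (cs : List String) (acc : List (String × Int)) (w : PySem.Set String),
      cs.foldl (fun p c => let r := goA graph f p.2 c l; (p.1 ++ r.1, r.2)) (acc, w) =
        (acc ++ (cs.foldl (fun p c => let r := goA graph f p.2 c l; (p.1 ++ r.1, r.2)) ([], w)).1,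
         (cs.foldl (fun p c => let r := goA graph f p.2 c l; (p.1 ++ r.1, r.2)) ([], w)).2) := by
  intro cs
  induction cs with
  | nil => intro acc w; simp
  | cons c t ih =>
    intro acc w
    simp only [List.foldl_cons]
    rw [ih (acc ++ (goA graph f w c l).1) ((goA graph f w c l).2),
        ih ([] ++ (goA graph f w c l).1) ((goA graph f w c l).2)]
    simp [List.append_assoc]

theorem children_subset (graph : List (String × List String)) (node c : String)
    (h : c ∈ childrenOf graph node) : c ∈ graph.flatMap (fun p => p.2) := by
  induction graph with
  | nil => simp [childrenOf, PySem.Dict.getD, PySem.Dict.get?] at h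
  | cons p t ih =>
    obtain ⟨k, vs⟩ := p
    simp only [List.flatMap_cons, List.mem_append]
    have hstep : childrenOf ((k, vs) :: t) node =
        if (k == node) = true then vs else childrenOf t node := by
      simp only [childrenOf, PySem.Dict.getD, PySem.Dict.get?_mk_cons]
      split <;> simp
    rw [hstep] at h
    by_cases hk : (k == node) = true
    · rw [if_pos hk] at h; exact Or.inl h
    · rw [if_neg hk] at h; exact Or.inr (ih h)

theorem loopB_sim (graph : List (String × List String)) (all : List String)
    (hchild : ∀ node c, c ∈ childrenOf graph node → c ∈ all) :
    ∀ (f : Nat) (v : PySem.Set String) (n : String) (l : Int) (rest : List (String × Int)),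
      n ∈ all → mCount all v < f →
      loopB graph all v ((n, l) :: rest) =
        (goA graph f v n l).1 ++ loopB graph all (goA graph f v n l).2 rest := by
  intro f
  induction f with
  | zero => intro v n l rest _ hf; omega
  | succ f ih =>
    intro v n l rest hn hf
    rw [goA, loopB]
    by_cases hv : PySem.Set.contains v n = true
    · have hmv : n ∈ v := by simpa using hv
      simp [hmv]
    · simp only [Bool.not_eq_true] at hv
      have hcn : all.contains n = true := by simpa using hn
      have hnv : n ∉ v := by simpa using hv
      rw [dif_neg (show ¬(PySem.Set.contains v n || !(all.contains n)) = true by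
            simp [hnv, hn]),
          if_neg (show ¬(PySem.Set.contains v n = true) by simp [hnv])]
      have hm : mCount all (PySem.Set.add v n) < f :=
        Nat.lt_of_lt_of_le (mCount_add_lt all v n hcn hv) (by omega)
      -- inner induction over the children list
      have key : ∀ (cs : List String), (∀ c ∈ cs, c ∈ all) →
          ∀ (w : PySem.Set String), mCount all w < f →
          ∀ (rs : List (String × Int)),
          loopB graph all w (cs.map (fun c => (c, l + 1)) ++ rs) =
            (cs.foldl (fun p c => let r := goA graph f p.2 c (l + 1); (p.1 ++ r.1, r.2)) ([], w)).1
              ++ loopB graph all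
                (cs.foldl (fun p c => let r := goA graph f p.2 c (l + 1); (p.1 ++ r.1, r.2)) ([], w)).2
                rs := by
        intro cs
        induction cs with
        | nil => intro _ w _ rs; simp
        | cons c t iht =>
          intro hcs w hw rs
          simp only [List.map_cons, List.cons_append, List.foldl_cons]
          rw [ih w c (l + 1) _ (hcs c (by simp)) hw]
          have hw' : mCount all (goA graph f w c (l + 1)).2 < f :=
            Nat.lt_of_le_of_lt (mCount_mono all w _ (goA_grows graph f w c (l + 1))) hw
          rw [iht (fun c' hc' => hcs c' (by simp [hc'])) _ hw' rs]
          rw [goA_fold_acc graph f (l + 1) t ([] ++ (goA graph f w c (l + 1)).1)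
                ((goA graph f w c (l + 1)).2)]
          simp [List.append_assoc]
      rw [key (childrenOf graph n) (fun c hc => hchild n c hc) (PySem.Set.add v n) hm rest]
      rw [goA_fold_acc graph f (l + 1) (childrenOf graph n) [(n, l)] (PySem.Set.add v n)]
      simp

-- ===== VERDICT (by name: the statement is the Claim_ definition above) =====
theorem dfs_spec : Claim_equal_dfs := by
  intro graph start _
  unfold Spec_dfs dfs dfs_alt
  have hchild : ∀ node c, c ∈ childrenOf graph node →
      c ∈ start :: graph.flatMap (fun p => p.2) := by
    intro node c hc
    exact List.mem_cons_of_mem _ (children_subset graph node c hc)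
  have hm : mCount (start :: graph.flatMap (fun p => p.2)) PySem.Set.empty <
      (start :: graph.flatMap (fun p => p.2)).length + 1 := by
    have := List.countP_le_length (l := start :: graph.flatMap (fun p => p.2))
      (p := fun x => !(PySem.Set.contains PySem.Set.empty x))
    simp only [mCount]
    omega
  rw [loopB_sim graph _ hchild _ PySem.Set.empty start 0 [] (by simp) hm]
  rw [loopB]
  simp
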